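-- pv_equiv track=rewrite | github.com/jjuuliak/G15-SLT-STEER-2 | backend/user_stats.py | calculate_current_and_next_level
-- ===== SOURCE A (Python) =====
-- LEVELS = {
--     "messages": [1, 10, 100, 1000],
--     "meal_plans": [1],
--     "meals": [1, 7, 14],
--     "workout_plans": [1],
--     "workouts": [1, 7, 14]
-- }
--
-- def calculate_current_and_next_level(stat: str, counter: int) -> (int, int, int):
--     levels = LEVELS[stat]
--
--     level = 0
--
--     for requirement in levels:
--         if counter >= requirement:
--             level += 1
--
--     if level >= len(levels):
--         next_level = -1
--     else:
--         next_level = levels[level]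
--
--     return level, next_level, levels
-- ===== SOURCE B (Python) =====
-- LEVELS = {
--     "messages": [1, 10, 100, 1000],
--     "meal_plans": [1],
--     "meals": [1, 7, 14],
--     "workout_plans": [1],
--     "workouts": [1, 7, 14]
-- }
--
-- def calculate_current_and_next_level(stat: str, counter: int) -> (int, int, int):
--     levels = LEVELS[stat]
--     # levels is sorted ascending, so the met thresholds form a prefix: the first
--     # unmet threshold is simultaneously the current level (its index) and the
--     # next requirement, so one early-exit scan yields both at once.
--     for i, requirement in enumerate(levels):
--         if counter < requirement:
--             return i, requirement, levels
--     return len(levels), -1, levels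
-- ===== Notes on version B (the rewrite author's own statement) =====
-- stated objective: simpler
-- what changed: A counts every met threshold and then indexes back into the list for the next one; B does one early-exit scan that stops at the first unmet threshold, returning its index as the level and the threshold itself as next_level (correct because each LEVELS list is sorted ascending), with no second indexing step.
import Mathlib
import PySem

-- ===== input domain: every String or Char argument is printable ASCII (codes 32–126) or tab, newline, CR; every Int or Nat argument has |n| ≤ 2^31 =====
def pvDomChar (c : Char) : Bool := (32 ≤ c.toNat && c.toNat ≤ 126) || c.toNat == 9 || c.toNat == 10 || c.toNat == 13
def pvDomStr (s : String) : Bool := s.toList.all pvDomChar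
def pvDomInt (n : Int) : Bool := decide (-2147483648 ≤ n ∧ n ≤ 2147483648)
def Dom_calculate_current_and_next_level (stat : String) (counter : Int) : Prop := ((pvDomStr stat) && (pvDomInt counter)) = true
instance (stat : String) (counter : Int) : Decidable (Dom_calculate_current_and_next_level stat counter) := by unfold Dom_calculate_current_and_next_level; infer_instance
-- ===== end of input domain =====

-- B replaces A's count-all-then-index-back scheme by a single early-exit scan that
-- returns the first unmet threshold's index and value directly (objective: simpler).

-- ===== PORT A =====
-- the module constant LEVELS (a dict, as an insertion-ordered association list)
def pyLEVELS : PySem.Dict String (List Int) :=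
  PySem.Dict.ofList [("messages", [1, 10, 100, 1000]), ("meal_plans", [1]),
    ("meals", [1, 7, 14]), ("workout_plans", [1]), ("workouts", [1, 7, 14])]

def calculate_current_and_next_level (stat : String) (counter : Int) : Int × Int × List Int :=
  match PySem.Dict.get? pyLEVELS stat with
  | none => (0, 0, [])   -- KeyError in Python; excluded by Pre_
  | some levels =>
    let level : Int := levels.foldl (fun lv requirement => if counter ≥ requirement then lv + 1 else lv) 0
    let next_level : Int :=
      if level ≥ (levels.length : Int) then -1
      else (PySem.List.pyGet? levels level).getD 0   -- in range here, getD default unreachable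
    (level, next_level, levels)

-- ===== PORT B =====
-- the for-loop with early return: scan with an index, stop at the first unmet threshold
def pvScanFirstUnmet (counter : Int) (levels : List Int) : List Int → Nat → Int × Int × List Int
  | [], i => ((i : Int), -1, levels)
  | requirement :: rest, i =>
    if counter < requirement then ((i : Int), requirement, levels)
    else pvScanFirstUnmet counter levels rest (i + 1)

def calculate_current_and_next_level_alt (stat : String) (counter : Int) : Int × Int × List Int :=
  match PySem.Dict.get? pyLEVELS stat with
  | none => (0, 0, [])   -- KeyError in Python; excluded by Pre_
  | some levels => pvScanFirstUnmet counter levels levels 0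

-- ===== PRECONDITION & SPEC =====
-- A raises KeyError on any stat outside LEVELS; Pre_ admits exactly the five keys.
def Pre_calculate_current_and_next_level (stat : String) (counter : Int) : Prop :=
  stat = "messages" ∨ stat = "meal_plans" ∨ stat = "meals" ∨ stat = "workout_plans" ∨ stat = "workouts"
instance (stat : String) (counter : Int) : Decidable (Pre_calculate_current_and_next_level stat counter) := by
  unfold Pre_calculate_current_and_next_level; infer_instance

def pvWitness_calculate_current_and_next_level : String × Int := ("meals", 8)

def Spec_calculate_current_and_next_level (stat : String) (counter : Int) (out : Int × Int × List Int) : Prop := out = calculate_current_and_next_level_alt stat counter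
instance (stat : String) (counter : Int) (out : Int × Int × List Int) : Decidable (Spec_calculate_current_and_next_level stat counter out) := by unfold Spec_calculate_current_and_next_level; infer_instance

-- ===== CLAIM (what is proved, stated in full; the proofs are below) =====
def Claim_equal_calculate_current_and_next_level : Prop := ∀ (stat : String) (counter : Int), Dom_calculate_current_and_next_level stat counter → Pre_calculate_current_and_next_level stat counter → Spec_calculate_current_and_next_level stat counter (calculate_current_and_next_level stat counter)

-- ===== LEMMAS AND PROOFS =====

-- per-list agreement, proved for each of the fixed (sorted) LEVELS lists by case
-- analysis on the threshold comparisons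
theorem pv_case (stat : String) (L : List Int) (counter : Int)
    (hget : PySem.Dict.get? pyLEVELS stat = some L)
    (heq : (let level : Int := L.foldl (fun lv requirement => if counter ≥ requirement then lv + 1 else lv) 0
            let next_level : Int :=
              if level ≥ (L.length : Int) then -1
              else (PySem.List.pyGet? L level).getD 0
            ((level, next_level, L) : Int × Int × List Int)) = pvScanFirstUnmet counter L L 0) :
    calculate_current_and_next_level stat counter = calculate_current_and_next_level_alt stat counter := by
  simp only [calculate_current_and_next_level, calculate_current_and_next_level_alt, hget]
  exact heq

-- ===== VERDICT (by name: the statement is the Claim_ definition above) =====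
set_option maxHeartbeats 2000000 in
theorem calculate_current_and_next_level_spec : Claim_equal_calculate_current_and_next_level := by
  intro stat counter _ hpre
  unfold Spec_calculate_current_and_next_level
  rcases hpre with h | h | h | h | h <;> subst h
  · refine pv_case _ [1, 10, 100, 1000] counter (by decide) ?_
    simp only [pvScanFirstUnmet, List.foldl, PySem.List.pyGet?, PySem.List.pyIdx?]
    split_ifs <;> simp_all <;> omega
  · refine pv_case _ [1] counter (by decide) ?_
    simp only [pvScanFirstUnmet, List.foldl, PySem.List.pyGet?, PySem.List.pyIdx?]
    split_ifs <;> simp_all <;> omega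
  · refine pv_case _ [1, 7, 14] counter (by decide) ?_
    simp only [pvScanFirstUnmet, List.foldl, PySem.List.pyGet?, PySem.List.pyIdx?]
    split_ifs <;> simp_all <;> omega
  · refine pv_case _ [1] counter (by decide) ?_
    simp only [pvScanFirstUnmet, List.foldl, PySem.List.pyGet?, PySem.List.pyIdx?]
    split_ifs <;> simp_all <;> omega
  · refine pv_case _ [1, 7, 14] counter (by decide) ?_
    simp only [pvScanFirstUnmet, List.foldl, PySem.List.pyGet?, PySem.List.pyIdx?]
    split_ifs <;> simp_all <;> omega
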